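-- pv_equiv track=rewrite | github.com/mateusb12/valorant_impact | webscrapping/model/analyse_json.py | handle_sides
-- ===== SOURCE A (Python) =====
-- def handle_sides(round_amount: int):
--     side_pattern = ["normal"] * 12
--     if round_amount > 24:
--         side_pattern += ["inverse"] * 12
--         ot_rounds = round_amount - 24
--         for item in range(1, ot_rounds + 1):
--             side_pattern += ["normal"] if item % 2 == 1 else ["inverse"]
--     else:
--         remaining = round_amount - 12
--         side_pattern += ["inverse"] * remaining
--
--     return {i: side for i, side in enumerate(side_pattern, 1)}
-- ===== SOURCE B (Python) =====
-- def _side(i: int) -> str: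
--     if i <= 12:
--         return "normal"
--     if i <= 24:
--         return "inverse"
--     return "normal" if i % 2 == 1 else "inverse"
--
--
-- def handle_sides(round_amount: int):
--     n = max(round_amount, 12)
--     return {i: _side(i) for i in range(1, n + 1)}
-- ===== Notes on version B (the rewrite author's own statement) =====
-- stated objective: simpler
-- what changed: Replaces A's segment-by-segment list building (replication plus an OT loop, then enumerate) with a single dict comprehension over range(1, max(round_amount,12)+1) classifying each round index by a closed-form rule.
import Mathlib
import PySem

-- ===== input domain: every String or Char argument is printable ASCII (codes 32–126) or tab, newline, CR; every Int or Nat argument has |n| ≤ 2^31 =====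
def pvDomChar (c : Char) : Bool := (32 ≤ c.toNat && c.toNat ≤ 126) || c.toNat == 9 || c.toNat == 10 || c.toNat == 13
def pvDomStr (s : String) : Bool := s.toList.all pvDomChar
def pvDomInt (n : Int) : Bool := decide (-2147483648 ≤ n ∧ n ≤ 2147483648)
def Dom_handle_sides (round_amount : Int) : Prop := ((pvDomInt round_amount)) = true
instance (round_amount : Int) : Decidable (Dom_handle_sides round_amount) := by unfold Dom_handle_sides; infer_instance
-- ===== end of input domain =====

-- B replaces A's segment-by-segment list construction with one per-index closed-form classification pass (objective: simpler).

-- ===== PORT A =====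
def handle_sides (round_amount : Int) : List (Int × String) :=
  let side_pattern := PySem.List.pyRepeat ["normal"] 12
  let side_pattern :=
    if round_amount > 24 then
      let side_pattern := side_pattern ++ PySem.List.pyRepeat ["inverse"] 12
      let ot_rounds := round_amount - 24
      (PySem.List.pyRange 1 (ot_rounds + 1) 1).foldl
        (fun acc item => acc ++ (if PySem.Int.mod item 2 == 1 then ["normal"] else ["inverse"]))
        side_pattern
    else
      let remaining := round_amount - 12
      side_pattern ++ PySem.List.pyRepeat ["inverse"] remaining
  -- {i: side for i, side in enumerate(side_pattern, 1)}: keys are distinct and ascending, so the dict is the pair list in order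
  PySem.List.enumerate side_pattern 1

-- ===== PORT B =====
def pvSide (i : Int) : String :=
  if i ≤ 12 then "normal"
  else if i ≤ 24 then "inverse"
  else if PySem.Int.mod i 2 == 1 then "normal" else "inverse"

def handle_sides_alt (round_amount : Int) : List (Int × String) :=
  let n := max round_amount 12
  (PySem.List.pyRange 1 (n + 1) 1).map (fun i => (i, pvSide i))

-- ===== PRECONDITION & SPEC =====
def Spec_handle_sides (round_amount : Int) (out : List (Int × String)) : Prop := out = handle_sides_alt round_amount
instance (round_amount : Int) (out : List (Int × String)) : Decidable (Spec_handle_sides round_amount out) := by unfold Spec_handle_sides; infer_instance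

-- ===== CLAIM (what is proved, stated in full; the proofs are below) =====
def Claim_equal_handle_sides : Prop := ∀ (round_amount : Int), Dom_handle_sides round_amount → Spec_handle_sides round_amount (handle_sides round_amount)

-- ===== LEMMAS AND PROOFS =====

def pvG (item : Int) : List String :=
  if PySem.Int.mod item 2 == 1 then ["normal"] else ["inverse"]

def pvPat (n : Nat) : List String :=
  PySem.List.pyRepeat ["normal"] 12 ++ PySem.List.pyRepeat ["inverse"] 12
    ++ (PySem.List.pyRange 1 ((n : Int) + 1) 1).flatMap pvG

lemma pvPat_length (n : Nat) : (pvPat n).length = 24 + n := by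
  have h : ∀ x : Int, (pvG x).length = 1 := by
    intro x; unfold pvG; split <;> rfl
  simp [pvPat, List.length_flatMap, h, PySem.List.pyRepeat]
  omega

lemma pvPat_succ (n : Nat) : pvPat (n + 1) = pvPat n ++ pvG ((n : Int) + 1) := by
  unfold pvPat
  rw [show ((n + 1 : Nat) : Int) + 1 = ((n : Int) + 1) + 1 by push_cast; ring,
      PySem.List.pyRange_one_succ_right (by omega)]
  simp

lemma pvMain (n : Nat) :
    PySem.List.enumerate (pvPat n) 1
      = (PySem.List.pyRange 1 ((24 : Int) + n + 1) 1).map (fun i => (i, pvSide i)) := by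
  induction n with
  | zero => decide
  | succ n ih =>
    rw [show (24 : Int) + (↑(n + 1) : Int) + 1 = ((24 : Int) + n + 1) + 1 by push_cast; ring,
        PySem.List.pyRange_one_succ_right (show (1:Int) ≤ 24 + n + 1 by omega), List.map_append,
        pvPat_succ, PySem.List.enumerate_append, pvPat_length, ih]
    congr 1
    have hmod : PySem.Int.mod ((n : Int) + 1) 2 = PySem.Int.mod (24 + (n : Int) + 1) 2 := by
      rw [PySem.Int.mod_eq_emod_of_pos (by omega), PySem.Int.mod_eq_emod_of_pos (by omega)]
      omega
    have h12 : ¬ ((24 : Int) + n + 1 ≤ 12) := by omega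
    have h24 : ¬ ((24 : Int) + n + 1 ≤ 24) := by omega
    have harg : (1 : Int) + ↑(24 + n) = 24 + (n : Int) + 1 := by push_cast; ring
    by_cases hp : (PySem.Int.mod ((n : Int) + 1) 2 == 1) = true
    · have hp' : (PySem.Int.mod (24 + (n : Int) + 1) 2 == 1) = true := by rw [← hmod]; exact hp
      simp only [pvG, pvSide, if_pos hp, List.map_cons, List.map_nil,
        PySem.List.enumerate_cons, PySem.List.enumerate_nil]
      rw [if_neg h12, if_neg h24, if_pos hp', harg]
    · have hp' : ¬ ((PySem.Int.mod (24 + (n : Int) + 1) 2 == 1) = true) := by rw [← hmod]; exact hp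
      simp only [pvG, pvSide, if_neg hp, List.map_cons, List.map_nil,
        PySem.List.enumerate_cons, PySem.List.enumerate_nil]
      rw [if_neg h12, if_neg h24, if_neg hp', harg]

theorem pv_gt24 (r : Int) (hr : 24 < r) : handle_sides r = handle_sides_alt r := by
  have key := pvMain (r - 24).toNat
  simp only [pvPat] at key
  rw [show (((r - 24).toNat : Int)) = r - 24 by omega] at key
  rw [show (24 : Int) + (r - 24) + 1 = r + 1 by ring] at key
  simp only [handle_sides, handle_sides_alt, if_pos hr, PySem.List.foldl_append_eq_flatMap]
  rw [show max r 12 = r from max_eq_left (by omega)]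
  exact key

theorem pv_le24 (r : Int) (hr : r ≤ 24) : handle_sides r = handle_sides_alt r := by
  by_cases h12 : r ≤ 12
  · have h1 : PySem.List.pyRepeat ["inverse"] (r - 12) = [] := by
      rw [PySem.List.pyRepeat_singleton, show (r - 12).toNat = 0 by omega]; rfl
    have h2 : max r 12 = 12 := max_eq_right (by omega)
    simp only [handle_sides, handle_sides_alt, if_neg (show ¬ (r > 24) by omega), h1, h2]
    decide
  · rw [not_le] at h12
    interval_cases r <;> decide

-- ===== VERDICT (by name: the statement is the Claim_ definition above) =====
theorem handle_sides_spec : Claim_equal_handle_sides := by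
  intro r _
  unfold Spec_handle_sides
  by_cases h : r ≤ 24
  · exact pv_le24 r h
  · exact pv_gt24 r (by omega)
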